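-- pv_equiv track=rewrite | github.com/Glitchy-Tozier/Revolve-keyboard-layout | check_neo.py | repeats_in_file
-- ===== SOURCE A (Python) =====
-- def repeats_in_file(data):
--     """Sort the repeats in a file by the number of occurrances.
--
--     >>> data = read_file("testfile")
--     >>> repeats_in_file(data)[:3]
--     [(2, 'a\\n'), (2, 'Aa'), (1, 'ui')]
--     """
--     repeats = {}
--     for i in range(len(data)-1):
--         rep = data[i] + data[i+1]
--         if rep in repeats:
--             repeats[rep] += 1
--         else:
--             repeats[rep] = 1
--     sorted_repeats = [(repeats[i], i) for i in repeats]
--     sorted_repeats.sort()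
--     sorted_repeats.reverse()
--     #reps = split_uppercase_repeats(sorted_repeats) # wrong place
--     return sorted_repeats
-- ===== SOURCE B (Python) =====
-- from itertools import groupby
--
-- def repeats_in_file(data):
--     """Sort the repeats in a file by the number of occurrances."""
--     bigrams = sorted(data[i:i + 2] for i in range(len(data) - 1))
--     sorted_repeats = [(len(list(group)), bigram) for bigram, group in groupby(bigrams)]
--     sorted_repeats.sort(reverse=True)
--     return sorted_repeats
-- ===== Notes on version B (the rewrite author's own statement) =====
-- stated objective: alternative
-- what changed: Replaces the hash-table counting loop (dict of bigram counts, then comprehension over keys, sort, reverse) by sort-then-group counting: build the bigram list, sort it, count runs of consecutive equal bigrams via itertools.groupby, then sort the (count, bigram) pairs in reverse; the final order agrees because tuple comparison on pairs with distinct bigram keys is a total order.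
import Mathlib
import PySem

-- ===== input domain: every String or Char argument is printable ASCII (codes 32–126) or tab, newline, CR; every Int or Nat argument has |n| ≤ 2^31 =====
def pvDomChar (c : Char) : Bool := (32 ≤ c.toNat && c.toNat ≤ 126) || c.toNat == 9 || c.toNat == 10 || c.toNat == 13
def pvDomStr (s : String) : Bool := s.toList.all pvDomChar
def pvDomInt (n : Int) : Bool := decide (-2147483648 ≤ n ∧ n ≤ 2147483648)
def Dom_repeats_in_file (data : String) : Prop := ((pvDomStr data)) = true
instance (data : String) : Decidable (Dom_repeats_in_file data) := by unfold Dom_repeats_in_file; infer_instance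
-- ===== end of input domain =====

-- B replaces A's dict-counting loop by sort-then-group counting of the bigram list (alternative
-- decomposition, same final ordering); proved to return the same list on every input.


-- ===== PORT A =====
-- for i in range(len(data)-1): rep = data[i]+data[i+1]; if rep in repeats: repeats[rep] += 1
-- else: repeats[rep] = 1; then [(repeats[k], k) for k in repeats]; .sort(); .reverse()
def repeats_in_file (data : String) : List (Int × String) :=
  let cs := data.toList
  let repeats : PySem.Dict String Int :=
    (PySem.List.pyRange 0 ((cs.length : Int) - 1) 1).foldl
      (fun d i =>
        if d.contains (String.ofList [PySem.List.pyGetD cs i ' ', PySem.List.pyGetD cs (i + 1) ' '])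
        then d.modify (String.ofList [PySem.List.pyGetD cs i ' ', PySem.List.pyGetD cs (i + 1) ' ']) 0 (· + 1)
        else d.insert (String.ofList [PySem.List.pyGetD cs i ' ', PySem.List.pyGetD cs (i + 1) ' ']) 1)
      PySem.Dict.empty
  let sorted_repeats := repeats.keys.map (fun k => (repeats.getD k 0, k))
  (PySem.List.sorted2 sorted_repeats (fun p => p.1) (fun p => p.2) false).reverse

-- ===== PORT B =====
-- run-length pass over the sorted bigram list: port of the groupby/len comprehension in Source B
def pvRle (x : String) (n : Int) : List String → List (Int × String)
  | [] => [(n, x)]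
  | y :: t => if y = x then pvRle x (n + 1) t else (n, x) :: pvRle y 1 t

def pvGroupCount : List String → List (Int × String)
  | [] => []
  | x :: t => pvRle x 1 t

-- bigrams = sorted(data[i:i+2] for i in range(len(data)-1)); group runs; sort(reverse=True)
def repeats_in_file_alt (data : String) : List (Int × String) :=
  let cs := data.toList
  let bigrams := PySem.List.sorted
    ((PySem.List.pyRange 0 ((cs.length : Int) - 1) 1).map
      (fun i => String.ofList (PySem.List.slice cs (some i) (some (i + 2)))))
    (fun s => s) false
  let sorted_repeats := pvGroupCount bigrams
  PySem.List.sorted2 sorted_repeats (fun p => p.1) (fun p => p.2) true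

-- ===== PRECONDITION & SPEC =====
def Spec_repeats_in_file (data : String) (out : List (Int × String)) : Prop := out = repeats_in_file_alt data
instance (data : String) (out : List (Int × String)) : Decidable (Spec_repeats_in_file data out) := by unfold Spec_repeats_in_file; infer_instance

-- ===== CLAIM (what is proved, stated in full; the proofs are below) =====
def Claim_equal_repeats_in_file : Prop := ∀ (data : String), Dom_repeats_in_file data → Spec_repeats_in_file data (repeats_in_file data)

-- ===== LEMMAS AND PROOFS =====

-- the structural bigram list both ports' range loops produce
def pvBigrams (cs : List Char) : List String :=
  (cs.zip cs.tail).map (fun p => String.ofList [p.1, p.2])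

-- the strict "tuple <" both final sorts compare with
def pvLt (a b : Int × String) : Bool :=
  decide (a.1 < b.1) || (!decide (b.1 < a.1) && decide (a.2 < b.2))

lemma pvRangeA_eq (cs : List Char) :
    (PySem.List.pyRange 0 ((cs.length : Int) - 1) 1).map
      (fun i => String.ofList [PySem.List.pyGetD cs i ' ', PySem.List.pyGetD cs (i + 1) ' '])
      = pvBigrams cs := by
  apply List.ext_getElem
  · simp [pvBigrams, PySem.List.length_pyRange_one, List.length_zip]
  · intro k h1 h2
    have hk : k + 1 < cs.length := by
      simp [pvBigrams, List.length_zip] at h2; omega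
    simp only [pvBigrams, List.getElem_map, PySem.List.getElem_pyRange_one, List.getElem_zip]
    rw [PySem.List.pyGetD_eq_getElem cs ' ' (by omega) (by omega),
        PySem.List.pyGetD_eq_getElem cs ' ' (by omega) (by omega)]
    simp only [show ((0:Int) + (k:Int)).toNat = k from by omega,
               show ((0:Int) + (k:Int) + 1).toNat = k + 1 from by omega,
               List.getElem_tail]

lemma pvSlice_two (cs : List Char) (k : Nat) (hk : k + 1 < cs.length) :
    PySem.List.slice cs (some (k:Int)) (some ((k:Int) + 2)) = [cs[k], cs[k+1]] := by
  rw [PySem.List.slice_toNat cs (by omega) (by omega)]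
  have h2 : ((k:Int)+2).toNat - ((k:Int)).toNat = 2 := by omega
  have h1 : ((k:Int)).toNat = k := by omega
  rw [h2, h1, List.drop_eq_getElem_cons (show k < cs.length by omega), List.take_succ_cons,
      List.drop_eq_getElem_cons (show k+1 < cs.length by omega), List.take_succ_cons]
  simp

lemma pvRangeB_eq (cs : List Char) :
    (PySem.List.pyRange 0 ((cs.length : Int) - 1) 1).map
      (fun i => String.ofList (PySem.List.slice cs (some i) (some (i + 2))))
      = pvBigrams cs := by
  apply List.ext_getElem
  · simp [pvBigrams, PySem.List.length_pyRange_one, List.length_zip]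
  · intro k h1 h2
    have hk : k + 1 < cs.length := by
      simp [pvBigrams, List.length_zip] at h2; omega
    simp only [pvBigrams, List.getElem_map, PySem.List.getElem_pyRange_one, List.getElem_zip]
    rw [show ((0:Int) + (k:Int)) = ((k:Nat) : Int) from by omega, pvSlice_two cs k hk]
    simp only [List.getElem_tail]

-- A's branching update is Counter's update
lemma pvStep_eq (d : PySem.Dict String Int) (x : String) :
    (if d.contains x then d.modify x 0 (· + 1) else d.insert x 1) = d.modify x 0 (· + 1) := by
  by_cases h : d.contains x = true
  · simp [h]
  · have h' : d.contains x = false := by simpa using h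
    simp [h, PySem.Dict.modify, PySem.Dict.getD_of_not_contains (h := h')]

lemma pvDictA_eq (cs : List Char) :
    (PySem.List.pyRange 0 ((cs.length : Int) - 1) 1).foldl
      (fun d i =>
        if d.contains (String.ofList [PySem.List.pyGetD cs i ' ', PySem.List.pyGetD cs (i + 1) ' '])
        then d.modify (String.ofList [PySem.List.pyGetD cs i ' ', PySem.List.pyGetD cs (i + 1) ' ']) 0 (· + 1)
        else d.insert (String.ofList [PySem.List.pyGetD cs i ' ', PySem.List.pyGetD cs (i + 1) ' ']) 1)
      PySem.Dict.empty = PySem.Dict.counter (pvBigrams cs) := by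
  rw [PySem.Dict.counter_eq_foldl, ← pvRangeA_eq cs, List.foldl_map]
  have hb : (fun (d : PySem.Dict String Int) (i : Int) =>
        if d.contains (String.ofList [PySem.List.pyGetD cs i ' ', PySem.List.pyGetD cs (i + 1) ' '])
        then d.modify (String.ofList [PySem.List.pyGetD cs i ' ', PySem.List.pyGetD cs (i + 1) ' ']) 0 (· + 1)
        else d.insert (String.ofList [PySem.List.pyGetD cs i ' ', PySem.List.pyGetD cs (i + 1) ' ']) 1)
      = (fun d i => d.modify (String.ofList [PySem.List.pyGetD cs i ' ', PySem.List.pyGetD cs (i + 1) ' ']) 0 (· + 1)) := by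
    funext d i
    exact pvStep_eq d _
  rw [hb]

-- run-length counting of a (≤)-sorted list
lemma pvRle_spec (t : List String) : ∀ (x : String) (n : Int),
    (x :: t).Pairwise (· ≤ ·) →
    pvRle x n t = (n + (t.count x : Int), x) :: pvGroupCount (t.dropWhile (· == x)) := by
  induction t with
  | nil => intro x n h; simp [pvRle, pvGroupCount]
  | cons y t' ih =>
    intro x n h
    by_cases hyx : y = x
    · subst hyx
      have h' : (y :: t').Pairwise (· ≤ ·) := h.of_cons
      rw [show pvRle y n (y :: t') = pvRle y (n+1) t' from by simp [pvRle]]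
      rw [ih y (n+1) h']
      simp
      omega
    · have hxy : x < y := lt_of_le_of_ne (List.rel_of_pairwise_cons h (List.mem_cons_self)) (Ne.symm hyx)
      have hnx : x ∉ y :: t' := by
        intro hm
        rcases List.mem_cons.mp hm with h1 | h1
        · exact hyx h1.symm
        · have : y ≤ x := List.rel_of_pairwise_cons h.of_cons h1
          exact absurd (lt_of_lt_of_le hxy this) (lt_irrefl x)
      rw [show pvRle x n (y :: t') = (n, x) :: pvRle y 1 t' from by simp [pvRle, hyx]]
      have hc : (y :: t').count x = 0 := List.count_eq_zero.mpr hnx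
      rw [show (y :: t').dropWhile (· == x) = y :: t' from by simp [hyx]]
      simp [hc, pvGroupCount]

-- run-length counting of a (≤)-sorted list gives Counter's items, up to order
lemma pvGC_aux : ∀ (N : Nat) (s : List String), s.length ≤ N → s.Pairwise (· ≤ ·) →
    (pvGroupCount s).Perm ((PySem.Set.ofList s).map (fun k => ((s.count k : Int), k))) := by
  intro N
  induction N with
  | zero =>
    intro s hl _
    have : s = [] := List.eq_nil_of_length_eq_zero (Nat.le_zero.mp hl)
    subst this; simp [pvGroupCount]
  | succ N ih =>
    intro s hl h
    match s with
    | [] => simp [pvGroupCount]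
    | x :: t =>
      set u := t.dropWhile (· == x) with hu
      have hsubl : u.Sublist t := List.dropWhile_sublist _
      have hup : u.Pairwise (· ≤ ·) := h.of_cons.sublist hsubl
      have hxu : x ∉ u := by
        intro hm
        match hmu : u with
        | [] => simp [hmu] at hm
        | y :: u' =>
          have hy : ¬ (y == x) = true := by
            have := List.head_dropWhile_not (fun z => z == x) (l := t)
            rw [← hu] at this
            simpa using this (by simp [hmu])
          have hyx : y ≠ x := by simpa using hy
          have hyt : y ∈ t := hsubl.mem (by simp [hmu])
          have hxy : x < y := lt_of_le_of_ne (List.rel_of_pairwise_cons h hyt) (Ne.symm hyx)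
          rcases List.mem_cons.mp hm with h1 | h1
          · exact hyx h1.symm
          · have : y ≤ x := List.rel_of_pairwise_cons (hmu ▸ hup) h1
            exact absurd (lt_of_lt_of_le hxy this) (lt_irrefl x)
      have hmem : ∀ z, z ∈ (x :: t) ↔ z = x ∨ z ∈ u := by
        intro z
        constructor
        · intro hz
          rcases List.mem_cons.mp hz with h1 | h1
          · exact Or.inl h1
          · rw [← List.takeWhile_append_dropWhile (p := (· == x)) (l := t)] at h1
            rcases List.mem_append.mp h1 with h2 | h2
            · exact Or.inl (by simpa using List.mem_takeWhile_imp h2)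
            · exact Or.inr h2
        · intro hz
          rcases hz with h1 | h1
          · simp [h1]
          · exact List.mem_cons_of_mem _ (hsubl.mem h1)
      have hperm1 : (PySem.Set.ofList (x :: t)).Perm (x :: PySem.Set.ofList u) := by
        rw [List.perm_ext_iff_of_nodup (PySem.Set.nodup_ofList _)
          (by simp [List.nodup_cons, PySem.Set.nodup_ofList, PySem.Set.mem_ofList, hxu])]
        intro z
        simp [PySem.Set.mem_ofList, hmem z]
      have hcount : ∀ k, k ∈ PySem.Set.ofList u → (x :: t).count k = u.count k := by
        intro k hk
        have hku : k ∈ u := (PySem.Set.mem_ofList u k).mp hk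
        have hkx : k ≠ x := fun e => hxu (e ▸ hku)
        rw [List.count_cons_of_ne hkx.symm, ← List.takeWhile_append_dropWhile (p := (· == x)) (l := t),
            List.count_append]
        have : (t.takeWhile (· == x)).count k = 0 := by
          apply List.count_eq_zero.mpr
          intro hm
          exact hkx (by simpa using List.mem_takeWhile_imp hm)
        rw [this]; simp [hu]
      have hlu : u.length ≤ N := by
        have := hsubl.length_le
        simp at hl; omega
      have ihu := ih u hlu hup
      have hcx : ((x :: t).count x : Int) = 1 + (t.count x : Int) := by
        simp [List.count_cons_self]; omega
      have hstep : pvGroupCount (x :: t) = (1 + (t.count x : Int), x) :: pvGroupCount u := by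
        rw [show pvGroupCount (x :: t) = pvRle x 1 t from rfl, pvRle_spec t x 1 h]
      rw [hstep]
      refine ((ihu.cons _).trans ?_)
      have heq : ((1 + (t.count x : Int), x) :: (PySem.Set.ofList u).map (fun k => ((u.count k : Int), k)))
          = (x :: PySem.Set.ofList u).map (fun k => (((x :: t).count k : Int), k)) := by
        simp only [List.map_cons, hcx]
        congr 1
        apply List.map_congr_left
        intro k hk
        rw [hcount k hk]
      rw [heq]
      exact (hperm1.map _).symm

-- the lexicographic tuple order: characterizations
lemma pvLt_true_iff (a b : Int × String) :
    pvLt a b = true ↔ (a.1 < b.1 ∨ (a.1 = b.1 ∧ a.2 < b.2)) := by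
  simp [pvLt]
  constructor
  · rintro (h | ⟨h1, h2⟩)
    · exact Or.inl h
    · rcases lt_trichotomy a.1 b.1 with h3 | h3 | h3
      · exact Or.inl h3
      · exact Or.inr ⟨h3, h2⟩
      · exact absurd h3 (not_lt.mpr h1)
  · rintro (h | ⟨h1, h2⟩)
    · exact Or.inl h
    · exact Or.inr ⟨le_of_eq h1, h2⟩

lemma pvLt_false_iff (a b : Int × String) :
    pvLt a b = false ↔ (b.1 < a.1 ∨ (a.1 = b.1 ∧ ¬ a.2 < b.2)) := by
  rw [← Bool.not_eq_true, pvLt_true_iff]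
  constructor
  · intro h
    rcases lt_trichotomy a.1 b.1 with h3 | h3 | h3
    · exact absurd (Or.inl h3) h
    · exact Or.inr ⟨h3, fun hs => h (Or.inr ⟨h3, hs⟩)⟩
    · exact Or.inl h3
  · rintro (h | ⟨h1, h2⟩) <;> rintro (h' | ⟨h1', h2'⟩)
    · omega
    · omega
    · omega
    · exact h2 h2'

lemma pvLt_asym (a b : Int × String) (h : pvLt a b = true) : pvLt b a = false := by
  rw [pvLt_true_iff] at h
  rw [pvLt_false_iff]
  rcases h with h | ⟨h1, h2⟩
  · exact Or.inl h
  · exact Or.inr ⟨h1.symm, fun h' => absurd (lt_trans h2 h') (lt_irrefl _)⟩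

lemma pvLt_compat (x y z : Int × String) (h1 : pvLt x y = true) (h2 : pvLt z y = false) :
    pvLt z x = false := by
  rw [pvLt_true_iff] at h1
  rw [pvLt_false_iff] at h2 ⊢
  rcases h1 with h1 | ⟨ha, hb⟩ <;> rcases h2 with h2 | ⟨hc, hd⟩
  · exact Or.inl (by omega)
  · exact Or.inl (by omega)
  · exact Or.inl (by omega)
  · exact Or.inr ⟨by omega, fun h' => hd (lt_trans h' hb)⟩

lemma pvLt_compat' (x y z : Int × String) (h1 : pvLt y x = true) (h2 : pvLt y z = false) :
    pvLt x z = false := by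
  rw [pvLt_true_iff] at h1
  rw [pvLt_false_iff] at h2 ⊢
  rcases h1 with h1 | ⟨ha, hb⟩ <;> rcases h2 with h2 | ⟨hc, hd⟩
  · exact Or.inl (by omega)
  · exact Or.inl (by omega)
  · exact Or.inl (by omega)
  · exact Or.inr ⟨by omega, fun h' => hd (lt_trans hb h')⟩

lemma pvLt_antisym (a b : Int × String) (h1 : pvLt a b = false) (h2 : pvLt b a = false) :
    a = b := by
  rw [pvLt_false_iff] at h1 h2
  have he1 : a.1 = b.1 := by rcases h1 with h | h <;> rcases h2 with h' | h' <;> omega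
  have he2 : a.2 = b.2 := by
    rcases h1 with h | h
    · omega
    · rcases h2 with h' | h'
      · omega
      · exact le_antisymm (le_of_not_gt h'.2) (le_of_not_gt h.2)
  exact Prod.ext he1 he2

-- insertion sort by an asymmetric comparator keeps the "no later element goes before" invariant
lemma pvInsertBy_pairwise {α : Type} (before : α → α → Bool)
    (hasym : ∀ a b, before a b = true → before b a = false)
    (hcompat : ∀ x y z, before x y = true → before z y = false → before z x = false)
    (x : α) (l : List α) (h : l.Pairwise (fun a b => before b a = false)) :
    (PySem.List.insertBy before x l).Pairwise (fun a b => before b a = false) := by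
  induction l with
  | nil => simp [PySem.List.insertBy]
  | cons y t ih =>
    by_cases hb : before x y = true
    · rw [show PySem.List.insertBy before x (y :: t) = x :: y :: t from by simp [PySem.List.insertBy, hb]]
      refine List.Pairwise.cons ?_ h
      intro z hz
      rcases List.mem_cons.mp hz with h1 | h1
      · subst h1; exact hasym _ _ hb
      · exact hcompat x y z hb (List.rel_of_pairwise_cons h h1)
    · have hb' : before x y = false := by simpa using hb
      rw [show PySem.List.insertBy before x (y :: t) = y :: PySem.List.insertBy before x t from by
        simp [PySem.List.insertBy, hb]]
      refine List.Pairwise.cons ?_ (ih h.of_cons)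
      intro z hz
      rcases (PySem.List.mem_insertBy before x z t).mp hz with h1 | h1
      · subst h1; exact hb'
      · exact List.rel_of_pairwise_cons h h1

lemma pvFoldIns_pairwise {α : Type} (before : α → α → Bool)
    (hasym : ∀ a b, before a b = true → before b a = false)
    (hcompat : ∀ x y z, before x y = true → before z y = false → before z x = false)
    (xs : List α) : ∀ (acc : List α), acc.Pairwise (fun a b => before b a = false) →
    (xs.foldl (fun acc x => PySem.List.insertBy before x acc) acc).Pairwise
      (fun a b => before b a = false) := by
  induction xs with
  | nil => intro acc h; simpa using h
  | cons x t ih =>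
    intro acc h
    exact ih _ (pvInsertBy_pairwise before hasym hcompat x acc h)

-- sort-ascending-then-reverse = sort-descending, on any rearrangement of the same pairs
lemma pvSorted2_rev_eq (la lb : List (Int × String)) (h : la.Perm lb) :
    (PySem.List.sorted2 la (fun p => p.1) (fun p => p.2) false).reverse
      = PySem.List.sorted2 lb (fun p => p.1) (fun p => p.2) true := by
  have hfalse : PySem.List.sorted2 la (fun p => p.1) (fun p => p.2) false
      = la.foldl (fun acc x => PySem.List.insertBy pvLt x acc) [] := rfl
  have htrue : PySem.List.sorted2 lb (fun p => p.1) (fun p => p.2) true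
      = lb.foldl (fun acc x => PySem.List.insertBy (fun a b => pvLt b a) x acc) [] := rfl
  have hp1 : (PySem.List.sorted2 la (fun p => p.1) (fun p => p.2) false).Pairwise
      (fun a b => pvLt b a = false) := by
    rw [hfalse]
    exact pvFoldIns_pairwise pvLt pvLt_asym pvLt_compat la [] (by simp)
  have hp2 : (PySem.List.sorted2 lb (fun p => p.1) (fun p => p.2) true).Pairwise
      (fun a b => pvLt a b = false) := by
    rw [htrue]
    exact pvFoldIns_pairwise (fun a b => pvLt b a)
      (fun a b hab => pvLt_asym b a hab)
      (fun x y z h1 h2 => pvLt_compat' x y z h1 h2) lb [] (by simp)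
  apply List.eq_of_perm_of_sorted (le := fun a b => pvLt a b = false)
  · intro a b _ _ hab hba
    exact pvLt_antisym a b hab hba
  · exact List.pairwise_reverse.mpr hp1
  · exact hp2
  · exact (List.reverse_perm _).trans ((PySem.List.sorted2_perm la _ _ false).trans
      (h.trans (PySem.List.sorted2_perm lb _ _ true).symm))

-- whole-program characterizations
lemma pvA_eq (data : String) : repeats_in_file data
    = (PySem.List.sorted2 ((PySem.Set.ofList (pvBigrams data.toList)).map
        (fun k => (((pvBigrams data.toList).count k : Int), k))) (fun p => p.1) (fun p => p.2) false).reverse := by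
  unfold repeats_in_file
  simp only [pvDictA_eq, PySem.Dict.keys_counter, PySem.Dict.getD_counter]

lemma pvB_eq (data : String) : repeats_in_file_alt data
    = PySem.List.sorted2
        (pvGroupCount (PySem.List.sorted (pvBigrams data.toList) (fun s => s) false))
        (fun p => p.1) (fun p => p.2) true := by
  unfold repeats_in_file_alt
  simp only [pvRangeB_eq]

-- ===== VERDICT (by name: the statement is the Claim_ definition above) =====
theorem repeats_in_file_spec : Claim_equal_repeats_in_file := by
  intro data _
  unfold Spec_repeats_in_file
  rw [pvA_eq, pvB_eq]
  apply pvSorted2_rev_eq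
  have hpair : (PySem.List.sorted (pvBigrams data.toList) (fun s => s) false).Pairwise (· ≤ ·) :=
    PySem.List.sorted_pairwise (pvBigrams data.toList) (fun s => s)
  have hgc := pvGC_aux (PySem.List.sorted (pvBigrams data.toList) (fun s => s) false).length
    (PySem.List.sorted (pvBigrams data.toList) (fun s => s) false) le_rfl hpair
  have hperm : (PySem.List.sorted (pvBigrams data.toList) (fun s => s) false).Perm (pvBigrams data.toList) :=
    PySem.List.sorted_perm _ _ false
  have hf : (fun k : String => (((PySem.List.sorted (pvBigrams data.toList) (fun s => s) false).count k : Int), k))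
      = (fun k : String => (((pvBigrams data.toList).count k : Int), k)) :=
    funext fun k => by rw [hperm.count_eq k]
  have hofp : (PySem.Set.ofList (PySem.List.sorted (pvBigrams data.toList) (fun s => s) false)).Perm
      (PySem.Set.ofList (pvBigrams data.toList)) := by
    rw [List.perm_ext_iff_of_nodup (PySem.Set.nodup_ofList _) (PySem.Set.nodup_ofList _)]
    intro z
    simp [PySem.Set.mem_ofList, hperm.mem_iff]
  rw [hf] at hgc
  exact ((hgc.trans (hofp.map _))).symm
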